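-- pv_equiv track=rewrite | github.com/MarekSvob/polyAfilter | RNAseqAnalysis.py | getTransEnding
-- ===== SOURCE A (Python) =====
-- def getTransEnding(exons, endLength, strd):
--     """Helper function to extract the exon-wise end pieces of a transcript,
--     consisting of a list of exons, of a given total cumulative length.
--
--     Parameters
--     ----------
--     exons : (list)
--         The complete list of exons constituting a transcript: [ (start, end) ]
--     endLength : (int)
--         The total length of the exon-wise ending.
--     strd : (bool)
--         The strand on which the transcript is found.
--
--     Returns
--     -------
--     transEndPieces : (list)
--         [ (start, end) ]
--     """
--
--     # Initiate the flattened exon-wise end pieces for this transcript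
--     transEndPieces = []
--     # Initiate how much is left to progress from the end
--     remaining = int(endLength)
--     # For each exon (ordered last-to-first wrt/ strand)
--     for eStart, eEnd in sorted(exons, reverse = strd):
--         # Get the exon length
--         exLen = eEnd - eStart
--         # If it is not longer than the remainder, add the entire exon &
--         #  decrease the remainder
--         if exLen < remaining:
--             transEndPieces.append((eStart, eEnd))
--             remaining -= exLen
--         # Otherwise add only the remaining piece of the exon & stop
--         else:
--             transEndPieces.append((eEnd - remaining, eEnd) if strd
--                                   else (eStart, eStart + remaining))
--             break
--
--     return transEndPieces
-- ===== SOURCE B (Python) =====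
-- def getTransEnding(exons, endLength, strd):
--     # Selection-based: never builds a sorted list; repeatedly extracts the
--     # strand-wise next exon from a working pool with max/min and removes it.
--     # Correct because equal tuples are interchangeable, so repeated extremal
--     # selection visits the exons in exactly sorted(exons, reverse=strd) order.
--     pieces = []
--     pool = list(exons)
--     need = int(endLength)
--     while pool:
--         ex = max(pool) if strd else min(pool)
--         pool.remove(ex)
--         eStart, eEnd = ex
--         if eEnd - eStart < need:
--             pieces.append(ex)
--             need -= eEnd - eStart
--         else:
--             pieces.append((eEnd - need, eEnd) if strd else (eStart, eStart + need))
--             break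
--     return pieces
-- ===== Notes on version B (the rewrite author's own statement) =====
-- stated objective: alternative
-- what changed: Replaces sort-then-scan with a selection loop: B never builds a sorted list but repeatedly extracts the strand-wise next exon from a working pool via max/min and removes it, processing exons one selection at a time; correct because repeated first-extremal selection visits the exons in exactly sorted(exons, reverse=strd) order (equal tuples are interchangeable).
import Mathlib
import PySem

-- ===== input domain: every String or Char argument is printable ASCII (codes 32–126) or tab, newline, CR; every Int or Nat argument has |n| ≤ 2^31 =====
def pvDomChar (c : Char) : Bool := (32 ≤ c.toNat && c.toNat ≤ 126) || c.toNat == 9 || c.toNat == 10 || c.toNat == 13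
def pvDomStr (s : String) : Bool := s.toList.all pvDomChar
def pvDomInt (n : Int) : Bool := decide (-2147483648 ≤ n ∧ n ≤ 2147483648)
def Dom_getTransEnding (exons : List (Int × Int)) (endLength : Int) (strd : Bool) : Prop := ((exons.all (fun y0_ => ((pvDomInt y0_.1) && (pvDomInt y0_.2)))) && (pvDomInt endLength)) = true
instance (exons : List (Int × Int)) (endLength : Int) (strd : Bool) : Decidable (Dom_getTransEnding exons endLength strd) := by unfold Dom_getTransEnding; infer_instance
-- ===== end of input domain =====

-- B replaces A's sort-then-scan with a selection loop: it never builds a sorted list, but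
-- repeatedly extracts the strand-wise next exon from a working pool with max/min (alternative).
-- B's Python mutates only its own local pool; the argument list is not modified by either program.

-- ===== PORT A =====
-- A's loop: append whole exons while shorter than the remainder, else append the partial piece and break.
def pvGoA (strd : Bool) : List (Int × Int) → Int → List (Int × Int)
  | [], _ => []
  | (s, e) :: rest, rem =>
    if e - s < rem then (s, e) :: pvGoA strd rest (rem - (e - s))
    else [if strd then (e - rem, e) else (s, s + rem)]

def getTransEnding (exons : List (Int × Int)) (endLength : Int) (strd : Bool) : List (Int × Int) :=
  pvGoA strd (PySem.List.sorted2 exons (fun p => p.1) (fun p => p.2) strd) endLength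

-- ===== PORT B =====
-- B's while loop over the shrinking pool, fuel = initial pool length (each pass removes one exon):
-- extract max(pool)/min(pool) (Python tuple order = PySem max2?/min2?), remove it, process it.
def pvSelB (strd : Bool) : Nat → List (Int × Int) → Int → List (Int × Int)
  | 0, _, _ => []
  | fuel + 1, pool, need =>
    match (if strd then PySem.List.max2? pool (fun p => p.1) (fun p => p.2)
           else PySem.List.min2? pool (fun p => p.1) (fun p => p.2)) with
    | none => []   -- pool is empty: the while loop stops
    | some ex =>
      let rest := (PySem.List.remove? pool ex).getD []   -- ex ∈ pool, so remove? never fails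
      if ex.2 - ex.1 < need then ex :: pvSelB strd fuel rest (need - (ex.2 - ex.1))
      else [if strd then (ex.2 - need, ex.2) else (ex.1, ex.1 + need)]

def getTransEnding_alt (exons : List (Int × Int)) (endLength : Int) (strd : Bool) : List (Int × Int) :=
  pvSelB strd exons.length exons endLength

-- ===== PRECONDITION & SPEC =====
def Spec_getTransEnding (exons : List (Int × Int)) (endLength : Int) (strd : Bool) (out : List (Int × Int)) : Prop := out = getTransEnding_alt exons endLength strd
instance (exons : List (Int × Int)) (endLength : Int) (strd : Bool) (out : List (Int × Int)) : Decidable (Spec_getTransEnding exons endLength strd out) := by unfold Spec_getTransEnding; infer_instance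

-- ===== CLAIM (what is proved, stated in full; the proofs are below) =====
def Claim_equal_getTransEnding : Prop := ∀ (exons : List (Int × Int)) (endLength : Int) (strd : Bool), Dom_getTransEnding exons endLength strd → Spec_getTransEnding exons endLength strd (getTransEnding exons endLength strd)

-- ===== LEMMAS AND PROOFS =====

-- Python's tuple order on (Int, Int) as a single linear-order key.
def pvKeyL (p : Int × Int) : Lex (Int × Int) := toLex p

-- The lex comparison boolean used by sorted2/max2?/min2? is exactly '<' under pvKeyL.
theorem pvLtBool (a b : Int × Int) :
    (decide (a.1 < b.1) || (!decide (b.1 < a.1) && decide (a.2 < b.2))) = decide (pvKeyL a < pvKeyL b) := by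
  by_cases h1 : a.1 < b.1 <;> by_cases h2 : b.1 < a.1 <;> by_cases h3 : a.2 < b.2 <;>
    simp [pvKeyL, Prod.Lex.lt_iff, h1, h2, h3] <;> omega

-- sorted2 with keys fst/snd is sorted under the single key pvKeyL.
theorem pvSorted2_eq (xs : List (Int × Int)) (rev : Bool) :
    PySem.List.sorted2 xs (fun p => p.1) (fun p => p.2) rev = PySem.List.sorted xs pvKeyL rev := by
  cases rev
  · rw [PySem.List.sorted_eq_foldl_insertBy]
    have hf : (fun a b : Int × Int => decide (a.1 < b.1) || (!decide (b.1 < a.1) && decide (a.2 < b.2)))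
        = fun a b => decide (pvKeyL a < pvKeyL b) := by
      funext a b; exact pvLtBool a b
    simp [PySem.List.sorted2, hf]
  · rw [PySem.List.sorted_rev_eq_foldl_insertBy]
    have hf : (fun a b : Int × Int => decide (b.1 < a.1) || (!decide (a.1 < b.1) && decide (b.2 < a.2)))
        = fun a b => decide (pvKeyL b < pvKeyL a) := by
      funext a b; exact pvLtBool b a
    simp [PySem.List.sorted2, hf]

-- max2?/min2? with keys fst/snd are max?/min? under pvKeyL.
theorem pvMax2_eq (xs : List (Int × Int)) :
    PySem.List.max2? xs (fun p => p.1) (fun p => p.2) = PySem.List.max? xs pvKeyL := by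
  simp only [PySem.List.max2?, PySem.List.max?]
  congr 1
  funext acc x
  cases acc with
  | none => rfl
  | some m => simp [pvLtBool m x]

theorem pvMin2_eq (xs : List (Int × Int)) :
    PySem.List.min2? xs (fun p => p.1) (fun p => p.2) = PySem.List.min? xs pvKeyL := by
  simp only [PySem.List.min2?, PySem.List.min?]
  congr 1
  funext acc x
  cases acc with
  | none => rfl
  | some m => simp [pvLtBool x m]

theorem pvKeyL_inj {a b : Int × Int} (h : pvKeyL a = pvKeyL b) : a = b := by
  simpa [pvKeyL, toLex_inj] using h

-- Peeling the head of the sorted list: the first extremal element comes first,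
-- the rest is the sorted remainder.
theorem pvHeadMax (xs : List (Int × Int)) (m : Int × Int)
    (h : PySem.List.max? xs pvKeyL = some m) :
    PySem.List.sorted xs pvKeyL true = m :: PySem.List.sorted (xs.erase m) pvKeyL true := by
  have hm : m ∈ xs := PySem.List.max?_mem h
  refine List.Perm.eq_of_pairwise (le := fun a b => pvKeyL b ≤ pvKeyL a) ?_ ?_ ?_ ?_
  · intro a b _ _ h1 h2
    exact pvKeyL_inj (le_antisymm h2 h1)
  · exact PySem.List.sorted_pairwise_rev xs pvKeyL
  · refine List.pairwise_cons.mpr ⟨?_, PySem.List.sorted_pairwise_rev _ pvKeyL⟩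
    intro y hy
    exact PySem.List.max?_isMax h y (List.mem_of_mem_erase ((PySem.List.mem_sorted _ _ _ _).mp hy))
  · exact ((PySem.List.sorted_perm xs pvKeyL true).trans (List.perm_cons_erase hm)).trans
      (List.Perm.cons m (PySem.List.sorted_perm _ pvKeyL true).symm)

theorem pvHeadMin (xs : List (Int × Int)) (m : Int × Int)
    (h : PySem.List.min? xs pvKeyL = some m) :
    PySem.List.sorted xs pvKeyL false = m :: PySem.List.sorted (xs.erase m) pvKeyL false := by
  have hm : m ∈ xs := PySem.List.min?_mem h
  refine List.Perm.eq_of_pairwise (le := fun a b => pvKeyL a ≤ pvKeyL b) ?_ ?_ ?_ ?_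
  · intro a b _ _ h1 h2
    exact pvKeyL_inj (le_antisymm h1 h2)
  · exact PySem.List.sorted_pairwise xs pvKeyL
  · refine List.pairwise_cons.mpr ⟨?_, PySem.List.sorted_pairwise _ pvKeyL⟩
    intro y hy
    exact PySem.List.min?_isMin h y (List.mem_of_mem_erase ((PySem.List.mem_sorted _ _ _ _).mp hy))
  · exact ((PySem.List.sorted_perm xs pvKeyL false).trans (List.perm_cons_erase hm)).trans
      (List.Perm.cons m (PySem.List.sorted_perm _ pvKeyL false).symm)

-- Main invariant: with enough fuel, B's selection loop computes A's scan of the sorted list.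
theorem pvMain (strd : Bool) :
    ∀ (fuel : Nat) (pool : List (Int × Int)) (need : Int), pool.length ≤ fuel →
      pvSelB strd fuel pool need = pvGoA strd (PySem.List.sorted pool pvKeyL strd) need := by
  intro fuel
  induction fuel with
  | zero =>
    intro pool need hlen
    have : pool = [] := List.length_eq_zero_iff.mp (Nat.le_zero.mp hlen)
    subst this
    simp [pvSelB, PySem.List.sorted, pvGoA]
  | succ fuel ih =>
    intro pool need hlen
    cases strd with
    | true =>
      cases hmx : PySem.List.max? pool pvKeyL with
      | none =>
        have : pool = [] := (PySem.List.max?_eq_none_iff pool pvKeyL).mp hmx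
        subst this
        simp [pvSelB, pvMax2_eq, hmx, PySem.List.sorted, pvGoA]
      | some m =>
        have hm : m ∈ pool := PySem.List.max?_mem hmx
        have hrem : PySem.List.remove? pool m = some (pool.erase m) :=
          PySem.List.remove?_eq_some_erase pool m hm
        have hlen' : (pool.erase m).length ≤ fuel := by
          rw [List.length_erase_of_mem hm]
          omega
        rw [pvHeadMax pool m hmx]
        obtain ⟨s, e⟩ := m
        by_cases hc : e - s < need
        · simp [pvSelB, pvMax2_eq, hmx, hrem, hc, pvGoA, ih _ _ hlen']
        · simp [pvSelB, pvMax2_eq, hmx, hc, pvGoA]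
    | false =>
      cases hmx : PySem.List.min? pool pvKeyL with
      | none =>
        have : pool = [] := (PySem.List.min?_eq_none_iff pool pvKeyL).mp hmx
        subst this
        simp [pvSelB, pvMin2_eq, hmx, PySem.List.sorted, pvGoA]
      | some m =>
        have hm : m ∈ pool := PySem.List.min?_mem hmx
        have hrem : PySem.List.remove? pool m = some (pool.erase m) :=
          PySem.List.remove?_eq_some_erase pool m hm
        have hlen' : (pool.erase m).length ≤ fuel := by
          rw [List.length_erase_of_mem hm]
          omega
        rw [pvHeadMin pool m hmx]
        obtain ⟨s, e⟩ := m
        by_cases hc : e - s < need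
        · simp [pvSelB, pvMin2_eq, hmx, hrem, hc, pvGoA, ih _ _ hlen']
        · simp [pvSelB, pvMin2_eq, hmx, hc, pvGoA]

-- ===== VERDICT (by name: the statement is the Claim_ definition above) =====
theorem getTransEnding_spec : Claim_equal_getTransEnding := by
  intro exons endLength strd _
  unfold Spec_getTransEnding getTransEnding getTransEnding_alt
  rw [pvSorted2_eq, pvMain strd exons.length exons endLength (le_refl _)]
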